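-- pv_equiv track=rewrite | github.com/daniel-reich/ubiquitous-fiesta | 5pBHzWb8Psot9EQNk_11.py | simple_encoder
-- ===== SOURCE A (Python) =====
-- def simple_encoder(s):
--   better = s.lower()
--   answer = ""
--   for x in better:
--     if better.count(x) == 1:
--       answer += "["
--     else:
--       answer += "]"
--   return answer
-- ===== SOURCE B (Python) =====
-- def simple_encoder(s):
--     better = s.lower()
--     srt = sorted(better)
--     unique = set()
--     i = 0
--     n = len(srt)
--     while i < n:
--         j = i + 1
--         while j < n and srt[j] == srt[i]:
--             j += 1
--         if j == i + 1:
--             unique.add(srt[i])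
--         i = j
--     return "".join("[" if c in unique else "]" for c in better)
-- ===== Notes on version B (the rewrite author's own statement) =====
-- stated objective: faster
-- what changed: B sorts the lowercased characters and detects unique characters by a single adjacency scan over runs of equal sorted characters, then maps each character to a bracket by set membership, instead of A's per-character whole-string count() rescans with quadratic string concatenation.
import Mathlib
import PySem

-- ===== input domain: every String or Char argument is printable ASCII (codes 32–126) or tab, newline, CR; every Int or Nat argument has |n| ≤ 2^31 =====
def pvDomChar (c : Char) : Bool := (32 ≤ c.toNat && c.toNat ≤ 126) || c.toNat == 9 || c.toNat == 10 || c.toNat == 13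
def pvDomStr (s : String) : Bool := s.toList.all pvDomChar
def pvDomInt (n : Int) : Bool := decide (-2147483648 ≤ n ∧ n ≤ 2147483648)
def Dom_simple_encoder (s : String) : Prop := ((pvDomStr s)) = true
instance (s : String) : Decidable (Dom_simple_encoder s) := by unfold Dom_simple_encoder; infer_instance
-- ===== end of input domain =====

-- B determines uniqueness by sorting the lowercased characters and scanning runs of
-- equal neighbours once, instead of A's per-character whole-string count() rescans.

-- ===== PORT A =====
-- better.count(x) with a one-character needle equals the character count — exact.
def simple_encoder (s : String) : String :=
  let better := PySem.Str.lower s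
  better.toList.foldl
    (fun answer x =>
      if better.toList.count x == 1 then answer ++ "[" else answer ++ "]") ""

-- ===== PORT B =====
-- the run scan of Source B's while loops: take the run of characters equal to the head;
-- if the run has length one, its character is unique
def collectUniques : List Char → List Char
  | [] => []
  | c :: rest =>
      let rest' := rest.dropWhile (fun x => x == c)
      if rest.takeWhile (fun x => x == c) = [] then c :: collectUniques rest'
      else collectUniques rest'
termination_by l => l.length
decreasing_by
  all_goals
    simp only [List.length_cons]
    exact Nat.lt_succ_of_le (List.Sublist.length_le (List.dropWhile_sublist _))

def simple_encoder_alt (s : String) : String :=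
  let better := (PySem.Str.lower s).toList
  let uniq := collectUniques (PySem.List.sorted better (fun c => c) false)
  String.join (better.map (fun c => if c ∈ uniq then "[" else "]"))

-- ===== PRECONDITION & SPEC =====
def Spec_simple_encoder (s : String) (out : String) : Prop := out = simple_encoder_alt s
instance (s : String) (out : String) : Decidable (Spec_simple_encoder s out) := by unfold Spec_simple_encoder; infer_instance

-- ===== CLAIM (what is proved, stated in full; the proofs are below) =====
def Claim_equal_simple_encoder : Prop := ∀ (s : String), Dom_simple_encoder s → Spec_simple_encoder s (simple_encoder s)

-- ===== LEMMAS AND PROOFS =====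

lemma foldl_append_shift : ∀ (l : List String) (a : String),
    l.foldl (· ++ ·) a = a ++ l.foldl (· ++ ·) "" := by
  intro l
  induction l with
  | nil => intro a; simp
  | cons x rest ih =>
      intro a
      simp only [List.foldl_cons]
      rw [ih (a ++ x), ih ("" ++ x), String.append_assoc]
      simp

lemma foldl_bracket (p : Char → Bool) : ∀ (l : List Char) (acc : String),
    l.foldl (fun a x => if p x then a ++ "[" else a ++ "]") acc
      = acc ++ String.join (l.map (fun c => if p c then "[" else "]")) := by
  intro l
  induction l with
  | nil => intro acc; simp [String.join]
  | cons c rest ih =>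
      intro acc
      simp only [List.foldl_cons, List.map_cons, String.join]
      rw [ih, foldl_append_shift _ ("" ++ _)]
      by_cases h : p c = true <;> simp [h, String.append_assoc, String.join]

lemma mem_collectUniques_iff : ∀ (l : List Char), l.Pairwise (· ≤ ·) →
    ∀ c, (c ∈ collectUniques l ↔ l.count c = 1) := by
  intro l
  induction l using collectUniques.induct with
  | case1 => intro _ c; simp [collectUniques]
  | case2 a rest rest' hrun ih =>
      intro hs c
      have hpair := (List.pairwise_cons.mp hs)
      have hrest : rest' = rest := by
        have := List.takeWhile_append_dropWhile (p := fun x => x == a) (l := rest)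
        simpa [hrun, rest'] using this
      have hs' : rest'.Pairwise (· ≤ ·) := hrest ▸ hpair.2
      have hna : a ∉ rest := by
        intro hmem
        rcases hd : rest with _ | ⟨h, t⟩
        · simp [hd] at hmem
        · have hne : ¬ (h == a) = true := by
            intro hh
            have : rest.takeWhile (fun x => x == a) ≠ [] := by simp [hd, hh]
            exact this hrun
          rw [hd] at hmem
          rcases List.mem_cons.mp hmem with heq | hmem'
          · exact hne (by simp [heq])
          · have h1 : a ≤ h := hpair.1 h (by simp [hd])
            have h2 : h ≤ a := (List.pairwise_cons.mp (hd ▸ hpair.2)).1 a hmem'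
            exact hne (by simp [le_antisymm h2 h1])
      have hstep : collectUniques (a :: rest) = a :: collectUniques rest' := by
        rw [collectUniques, if_pos hrun]
      rw [hstep, hrest]
      by_cases hca : c = a
      · subst hca
        simp [List.count_eq_zero.mpr hna]
      · have hcount : (a :: rest).count c = rest.count c := by
          simp [Ne.symm hca]
        rw [List.mem_cons, hcount]
        simp only [hca, false_or]
        exact (hrest ▸ ih hs' c)
  | case3 a rest rest' hrun ih =>
      intro hs c
      have hpair := (List.pairwise_cons.mp hs)
      have hs' : rest'.Pairwise (· ≤ ·) := hpair.2.sublist (List.dropWhile_sublist _)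
      have hsplit : rest = rest.takeWhile (fun x => x == a) ++ rest' :=
        (List.takeWhile_append_dropWhile ..).symm
      have hruneq : ∀ x ∈ rest.takeWhile (fun x => x == a), x = a := by
        intro x hx
        simpa using List.mem_takeWhile_imp hx
      have hna : a ∉ rest' := by
        intro hmem
        rcases hd : rest' with _ | ⟨h, t⟩
        · exact absurd (hd ▸ hmem) (List.not_mem_nil)
        · have hne : ¬ (h == a) = true := by
            have hnil : rest.dropWhile (fun x => x == a) ≠ [] := by
              rw [show rest.dropWhile (fun x => x == a) = rest' from rfl, hd]; simp
            have := List.head_dropWhile_not (p := fun x => x == a) (l := rest) hnil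
            simpa [show rest.dropWhile (fun x => x == a) = rest' from rfl, hd] using this
          have hmemrest : h ∈ rest := (List.dropWhile_sublist _).mem
            (by rw [show rest.dropWhile (fun x => x == a) = rest' from rfl, hd]; simp)
          rw [hd] at hmem
          rcases List.mem_cons.mp hmem with heq | hmem'
          · exact hne (by simp [heq])
          · have h1 : a ≤ h := hpair.1 h hmemrest
            have h2 : h ≤ a := (List.pairwise_cons.mp (hd ▸ hs')).1 a hmem'
            exact hne (by simp [le_antisymm h2 h1])
      have hstep : collectUniques (a :: rest) = collectUniques rest' := by
        rw [collectUniques, if_neg hrun]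
      have hlen : 1 ≤ (rest.takeWhile (fun x => x == a)).length :=
        List.length_pos_iff.mpr hrun
      rw [hstep]
      by_cases hca : c = a
      · subst hca
        have hcnt_run : (rest.takeWhile (fun x => x == c)).count c
            = (rest.takeWhile (fun x => x == c)).length :=
          List.count_eq_length.mpr (fun x hx => ((hruneq x hx).symm ▸ rfl))
        have hcount : (c :: rest).count c
            = 1 + (rest.takeWhile (fun x => x == c)).length + rest'.count c := by
          rw [List.count_cons_self]
          conv_lhs => rw [hsplit]
          rw [List.count_append, hcnt_run]
          omega
        have hzero : rest'.count c = 0 := List.count_eq_zero.mpr hna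
        constructor
        · intro hmem
          exact absurd ((ih hs' c).mp hmem) (by omega)
        · intro hc; omega
      · have hrun0 : (rest.takeWhile (fun x => x == a)).count c = 0 :=
          List.count_eq_zero.mpr (fun hx => hca (hruneq c hx))
        have hcount : (a :: rest).count c = rest'.count c := by
          rw [List.count_cons]
          conv_lhs => rw [hsplit]
          rw [List.count_append, hrun0]
          simp [Ne.symm hca]
        rw [hcount]
        exact ih hs' c

-- ===== VERDICT (by name: the statement is the Claim_ definition above) =====
theorem simple_encoder_spec : Claim_equal_simple_encoder := by
  intro s _
  simp only [Spec_simple_encoder, simple_encoder, simple_encoder_alt]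
  rw [foldl_bracket]
  have hfun : (fun c => if c ∈ collectUniques
        (PySem.List.sorted (PySem.Str.lower s).toList (fun c => c) false) then "[" else "]")
      = (fun c => if ((PySem.Str.lower s).toList.count c == 1) then "[" else "]") := by
    funext c
    have hmem := mem_collectUniques_iff
      (PySem.List.sorted (PySem.Str.lower s).toList (fun c => c) false)
      (PySem.List.sorted_pairwise ..) c
    have hperm : (PySem.List.sorted (PySem.Str.lower s).toList (fun c => c) false).count c
        = (PySem.Str.lower s).toList.count c :=
      (PySem.List.sorted_perm ..).count_eq c
    rw [hperm] at hmem
    simp only [PySem.Str.toList_lower] at hmem ⊢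
    by_cases h : (PySem.Chars.lower s.toList).count c = 1
    · rw [if_pos (hmem.mpr h)]
      simp [h]
    · rw [if_neg (fun hm => h (hmem.mp hm))]
      simp [h]
  rw [hfun]
  simp
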